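-- pv_equiv track=rewrite | github.com/joaquinmartinezjimenez146-sys/pcd_boletin1 | src/juego_3_en_raya.py | generar_tablero
-- ===== SOURCE A (Python) =====
-- fichas = ['o', 'x']
--
-- def generar_tablero(n, movimientos_jugadores):
--     tablero = []
--     for i in range(n):
--         fila = ['_' for _ in range(n)]
--         for j in range(n):
--             for k in range(len(movimientos_jugadores)):
--                 movimientos_jugador = movimientos_jugadores[k]
--                 if i in movimientos_jugador:
--                     if j in movimientos_jugador[i]:
--                         fila[j] = fichas[k]
--         tablero.append(fila)
--     return tablero
-- ===== SOURCE B (Python) =====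
-- fichas = ['o', 'x']
--
-- def generar_tablero(n, movimientos_jugadores):
--     tablero = [['_'] * n for _ in range(n)]
--     for k, movimientos in enumerate(movimientos_jugadores):
--         for i, columnas in movimientos.items():
--             if 0 <= i < n:
--                 for j in columnas:
--                     if 0 <= j < n:
--                         tablero[i][j] = fichas[k]
--     return tablero
-- ===== Notes on version B (the rewrite author's own statement) =====
-- stated objective: faster
-- what changed: Instead of scanning every player's dict for every one of the n*n cells, B initialises the board once and iterates only over the actual moves of each player in order, writing each in-range (row, col) directly.
import Mathlib
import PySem

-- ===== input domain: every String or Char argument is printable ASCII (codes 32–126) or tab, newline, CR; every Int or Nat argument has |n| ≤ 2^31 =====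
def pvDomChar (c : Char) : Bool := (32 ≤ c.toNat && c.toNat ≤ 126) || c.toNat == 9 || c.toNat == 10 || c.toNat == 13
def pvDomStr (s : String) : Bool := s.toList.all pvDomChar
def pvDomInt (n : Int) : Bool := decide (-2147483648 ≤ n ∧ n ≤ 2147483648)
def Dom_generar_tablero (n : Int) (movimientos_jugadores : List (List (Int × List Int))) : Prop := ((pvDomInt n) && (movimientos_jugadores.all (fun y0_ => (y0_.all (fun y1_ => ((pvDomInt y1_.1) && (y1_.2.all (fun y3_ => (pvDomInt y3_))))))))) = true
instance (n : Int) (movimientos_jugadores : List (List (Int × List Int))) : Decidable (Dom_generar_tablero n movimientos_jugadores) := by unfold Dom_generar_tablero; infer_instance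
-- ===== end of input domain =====

-- B replaces A's per-cell scan of every player's move dict by one pass over the actual moves (faster, see claim).
-- ===== PORT A =====
def fichas : List String := ["o", "x"]

def generar_tablero (n : Int) (movimientos_jugadores : List (List (Int × List Int))) : List (List String) :=
  (PySem.List.pyRange 0 n 1).foldl (fun tablero i =>
    let fila0 : List String := (PySem.List.pyRange 0 n 1).map (fun _ => "_")
    let fila := (PySem.List.pyRange 0 n 1).foldl (fun fila j =>
      (PySem.List.pyRange 0 (movimientos_jugadores.length : Int) 1).foldl (fun fila k =>
        let mj := PySem.List.pyGetD movimientos_jugadores k []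
        if (PySem.Dict.mk mj).contains i then
          if (((PySem.Dict.mk mj).get? i).getD []).contains j then
            -- fichas[k] raises IndexError for k ≥ 2; Pre_ excludes reaching it, so the total form's "" is never used
            PySem.List.pySetD fila j (PySem.List.pyGetD fichas k "")
          else fila
        else fila) fila) fila0
    tablero ++ [fila]) []

-- ===== PORT B =====
def generar_tablero_alt (n : Int) (movimientos_jugadores : List (List (Int × List Int))) : List (List String) :=
  let tablero0 : List (List String) :=
    (PySem.List.pyRange 0 n 1).map (fun _ => PySem.List.pyRepeat ["_"] n)
  (PySem.List.enumerate movimientos_jugadores).foldl (fun tablero km =>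
    km.2.foldl (fun tablero p =>
      if 0 ≤ p.1 ∧ p.1 < n then
        p.2.foldl (fun tablero j =>
          if 0 ≤ j ∧ j < n then
            PySem.List.pySetD tablero p.1
              (PySem.List.pySetD (PySem.List.pyGetD tablero p.1 []) j
                (PySem.List.pyGetD fichas km.1 ""))
          else tablero) tablero
      else tablero) tablero) tablero0

-- ===== PRECONDITION & SPEC =====
-- Pre_ excludes (a) association lists with duplicate keys, which no Python dict can produce, and
-- (b) exactly the inputs where A raises IndexError on fichas[k] (a third-or-later player with a move inside the board).
def Pre_generar_tablero (n : Int) (movimientos_jugadores : List (List (Int × List Int))) : Prop :=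
  (∀ d ∈ movimientos_jugadores, (d.map Prod.fst).Nodup) ∧
  (∀ d ∈ movimientos_jugadores.drop 2, ∀ p ∈ d,
    ¬(0 ≤ p.1 ∧ p.1 < n ∧ ∃ j ∈ p.2, 0 ≤ j ∧ j < n))
instance (n : Int) (movimientos_jugadores : List (List (Int × List Int))) : Decidable (Pre_generar_tablero n movimientos_jugadores) := by unfold Pre_generar_tablero; infer_instance

def pvWitness_generar_tablero : Int × (List (List (Int × List Int))) :=
  (3, [[(0, [0, 2]), (1, [2])], [(1, [1])]])

def Spec_generar_tablero (n : Int) (movimientos_jugadores : List (List (Int × List Int))) (out : List (List String)) : Prop := out = generar_tablero_alt n movimientos_jugadores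
instance (n : Int) (movimientos_jugadores : List (List (Int × List Int))) (out : List (List String)) : Decidable (Spec_generar_tablero n movimientos_jugadores out) := by unfold Spec_generar_tablero; infer_instance

-- ===== CLAIM (what is proved, stated in full; the proofs are below) =====
def Claim_equal_generar_tablero : Prop := ∀ (n : Int) (movimientos_jugadores : List (List (Int × List Int))), Dom_generar_tablero n movimientos_jugadores → Pre_generar_tablero n movimientos_jugadores → Spec_generar_tablero n movimientos_jugadores (generar_tablero n movimientos_jugadores)

-- ===== LEMMAS AND PROOFS =====

-- small getD/set facts in the form used below
theorem pv_getD_set_self {α : Type} (l : List α) (m : Nat) (v d : α) (h : m < l.length) :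
    (l.set m v).getD m d = v := by
  rw [List.getD_eq_getElem?_getD, List.getElem?_set_self h, Option.getD_some]

theorem pv_getD_set_ne {α : Type} (l : List α) (m m' : Nat) (v d : α) (h : m ≠ m') :
    (l.set m v).getD m' d = l.getD m' d := by
  rw [List.getD_eq_getElem?_getD, List.getElem?_set_ne h, ← List.getD_eq_getElem?_getD]

theorem pv_set_getD_self {α : Type} (l : List α) (m : Nat) (d : α) (h : m < l.length) :
    l.set m (l.getD m d) = l := by
  rw [List.getD_eq_getElem?_getD, List.getElem?_eq_getElem h, Option.getD_some]
  exact List.set_getElem_self h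

theorem pv_pyGetD_nonneg {α : Type} (xs : List α) (i : Int) (d : α) (h : 0 ≤ i) :
    PySem.List.pyGetD xs i d = xs.getD i.toNat d := by
  conv_lhs => rw [← Int.toNat_of_nonneg h]
  rw [PySem.List.pyGetD_natCast]

theorem pv_mem_set {α : Type} {l : List α} {m : Nat} {v x : α} (hx : x ∈ l.set m v) :
    x = v ∨ x ∈ l := by
  rcases List.mem_iff_getElem.mp hx with ⟨p, hp, he⟩
  have h2 : (l.set m v)[p]? = some x := by rw [List.getElem?_eq_getElem hp, he]
  rw [List.getElem?_set] at h2
  by_cases h3 : m = p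
  · rw [if_pos h3] at h2
    by_cases h4 : m < l.length
    · rw [if_pos h4] at h2
      exact Or.inl (Option.some_inj.mp h2).symm
    · rw [if_neg h4] at h2
      exact absurd h2 (by simp)
  · rw [if_neg h3] at h2
    exact Or.inr (List.mem_of_getElem? h2)

theorem pv_getD_getD_eq_getElem {α : Type} (xs : List (List α)) (p q : Nat) (d : List α)
    (d' : α) (h1 : p < xs.length) (hq : q < xs[p].length) :
    (xs.getD p d).getD q d' = xs[p][q] := by
  rw [List.getD_eq_getElem?_getD (l := xs) (i := p), List.getElem?_eq_getElem h1,
    Option.getD_some, List.getD_eq_getElem?_getD, List.getElem?_eq_getElem hq, Option.getD_some]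

-- `hitP d i j`: cell (i,j) is hit by the move dict `d` (key membership and column membership)
def hitP (d : List (Int × List Int)) (i j : Int) : Bool :=
  (PySem.Dict.mk d).contains i && (((PySem.Dict.mk d).get? i).getD []).contains j

theorem hitP_cons (pr : Int × List Int) (rest : List (Int × List Int)) (i j : Int) :
    hitP (pr :: rest) i j = if pr.1 == i then pr.2.contains j else hitP rest i j := by
  unfold hitP
  rw [PySem.Dict.contains_eq_isSome_get?, PySem.Dict.contains_eq_isSome_get?]
  rw [show (PySem.Dict.mk (pr :: rest)) = PySem.Dict.mk ((pr.1, pr.2) :: rest) from rfl]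
  rw [PySem.Dict.get?_mk_cons]
  cases (pr.1 == i) <;> simp

theorem hitP_eq_false_of_not_key (rest : List (Int × List Int)) (i j : Int)
    (h : i ∉ rest.map Prod.fst) : hitP rest i j = false := by
  unfold hitP
  rw [PySem.Dict.contains_eq_isSome_get?]
  have hn : (PySem.Dict.mk rest).get? i = none := by
    rw [PySem.Dict.get?_eq_none_iff_not_mem_keys]
    simpa [PySem.Dict.keys_mk] using h
  simp [hn]

-- the value cell (i,j) holds after the indexed players `ps` acted, starting from v
def cellP (ps : List (Int × List (Int × List Int))) (i j : Int) (v : String) : String :=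
  ps.foldl (fun v pr => if hitP pr.2 i j then PySem.List.pyGetD fichas pr.1 "" else v) v

theorem cellP_cons (pr : Int × List (Int × List Int)) (ps : List (Int × List (Int × List Int)))
    (i j : Int) (v : String) :
    cellP (pr :: ps) i j v
      = cellP ps i j (if hitP pr.2 i j then PySem.List.pyGetD fichas pr.1 "" else v) := rfl

def cell (mvs : List (List (Int × List Int))) (i j : Int) : String :=
  cellP (PySem.List.enumerate mvs) i j "_"

def grid (n : Int) (mvs : List (List (Int × List Int))) : List (List String) :=
  (PySem.List.pyRange 0 n 1).map (fun i => (PySem.List.pyRange 0 n 1).map (fun j => cell mvs i j))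

-- ---------- A side ----------

theorem stepA_eq (d : List (Int × List Int)) (i j : Int) (fila : List String) (v : String) :
    (if (PySem.Dict.mk d).contains i then
       if (((PySem.Dict.mk d).get? i).getD []).contains j then PySem.List.pySetD fila j v else fila
     else fila)
    = if hitP d i j then PySem.List.pySetD fila j v else fila := by
  unfold hitP
  cases (PySem.Dict.mk d).contains i <;>
    cases (((PySem.Dict.mk d).get? i).getD []).contains j <;> simp

theorem kfold_eq (mvs : List (List (Int × List Int))) (i j : Int) (hj : 0 ≤ j) :
    ∀ (m : Nat) (a : Int), 0 ≤ a → mvs.length - a.toNat = m →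
    ∀ (fila : List String), j.toNat < fila.length →
    (PySem.List.pyRange a (mvs.length : Int) 1).foldl (fun fila k =>
        let mj := PySem.List.pyGetD mvs k []
        if (PySem.Dict.mk mj).contains i then
          if (((PySem.Dict.mk mj).get? i).getD []).contains j then
            PySem.List.pySetD fila j (PySem.List.pyGetD fichas k "")
          else fila
        else fila) fila
      = fila.set j.toNat (cellP (PySem.List.enumerate (mvs.drop a.toNat) a) i j (fila.getD j.toNat "_")) := by
  intro m
  induction m with
  | zero =>
    intro a ha hm fila hlen
    have h1 : (mvs.length : Int) ≤ a := by omega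
    have h2 : mvs.length ≤ a.toNat := by omega
    rw [PySem.List.pyRange_one_eq_nil h1, List.drop_eq_nil_iff.mpr (by omega)]
    simp only [List.foldl_nil, PySem.List.enumerate_nil, cellP]
    exact (pv_set_getD_self fila j.toNat "_" hlen).symm
  | succ m ih =>
    intro a ha hm fila hlen
    have haL : a < (mvs.length : Int) := by omega
    have hidx : a.toNat < mvs.length := by omega
    rw [PySem.List.pyRange_one_cons haL]
    simp only [List.foldl_cons]
    rw [List.drop_eq_getElem_cons hidx, PySem.List.enumerate_cons, cellP_cons]
    rw [PySem.List.pyGetD_eq_getElem mvs [] ha (by exact_mod_cast haL)]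
    rw [stepA_eq]
    have hstep : (a + 1).toNat = a.toNat + 1 := by omega
    by_cases hhit : hitP mvs[a.toNat] i j = true
    · rw [if_pos hhit, if_pos hhit]
      rw [PySem.List.pySetD_of_nonneg fila _ hj]
      rw [ih (a + 1) (by omega) (by omega) _ (by rw [List.length_set]; exact hlen)]
      rw [hstep, pv_getD_set_self _ _ _ _ hlen, List.set_set]
    · rw [if_neg hhit, if_neg hhit]
      rw [ih (a + 1) (by omega) (by omega) fila hlen, hstep]

theorem jfold_eq (mvs : List (List (Int × List Int))) (i : Int) :
    ∀ (js : List Int) (fila : List String), js.Nodup →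
    (∀ j ∈ js, 0 ≤ j ∧ j.toNat < fila.length) →
    (∀ j ∈ js, fila.getD j.toNat "_" = "_") →
    js.foldl (fun fila j =>
        (PySem.List.pyRange 0 (mvs.length : Int) 1).foldl (fun fila k =>
          let mj := PySem.List.pyGetD mvs k []
          if (PySem.Dict.mk mj).contains i then
            if (((PySem.Dict.mk mj).get? i).getD []).contains j then
              PySem.List.pySetD fila j (PySem.List.pyGetD fichas k "")
            else fila
          else fila) fila) fila
      = js.foldl (fun fila j => fila.set j.toNat (cell mvs i j)) fila := by
  intro js
  induction js with
  | nil => intro fila _ _ _; rfl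
  | cons j js ihj =>
    intro fila hnd hb h0
    simp only [List.foldl_cons]
    have hjmem : j ∈ j :: js := List.mem_cons_self
    have hj0 : 0 ≤ j := (hb j hjmem).1
    rw [kfold_eq mvs i j hj0 mvs.length 0 le_rfl (by simp) fila (hb j hjmem).2]
    simp only [Int.toNat_zero, List.drop_zero]
    rw [h0 j hjmem]
    have hcell : cellP (PySem.List.enumerate mvs 0) i j "_" = cell mvs i j := rfl
    rw [hcell]
    apply ihj
    · exact (List.nodup_cons.mp hnd).2
    · intro j' hj'
      refine ⟨(hb j' (List.mem_cons_of_mem _ hj')).1, ?_⟩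
      rw [List.length_set]; exact (hb j' (List.mem_cons_of_mem _ hj')).2
    · intro j' hj'
      have hne : j ≠ j' := by
        intro hEq; exact (List.nodup_cons.mp hnd).1 (hEq ▸ hj')
      have hne' : j.toNat ≠ j'.toNat := by
        have := (hb j' (List.mem_cons_of_mem _ hj')).1
        omega
      rw [pv_getD_set_ne _ _ _ _ _ hne']
      exact h0 j' (List.mem_cons_of_mem _ hj')

theorem pv_foldl_set_range {α : Type} (g : Nat → α) :
    ∀ (m : Nat) (acc : List α), m ≤ acc.length →
    (List.range m).foldl (fun f k => f.set k (g k)) acc = (List.range m).map g ++ acc.drop m := by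
  intro m
  induction m with
  | zero => intro acc _; simp
  | succ m ih =>
    intro acc h
    rw [List.range_succ, List.foldl_append, List.foldl_cons, List.foldl_nil]
    rw [ih acc (by omega)]
    rw [List.set_append]
    have hlen : (List.map g (List.range m)).length = m := by simp
    rw [if_neg (by omega), hlen, Nat.sub_self]
    rw [List.drop_eq_getElem_cons (show m < acc.length by omega), List.set_cons_zero]
    rw [List.map_append, List.append_assoc]
    simp

theorem A_eq_grid (n : Int) (mvs : List (List (Int × List Int))) :
    generar_tablero n mvs = grid n mvs := by
  simp only [generar_tablero, grid]
  rw [PySem.List.foldl_append_singleton_eq_map, List.nil_append]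
  apply List.map_congr_left
  intro i _
  rw [jfold_eq mvs i (PySem.List.pyRange 0 n 1)
        ((PySem.List.pyRange 0 n 1).map (fun _ => "_"))
        (PySem.List.nodup_pyRange_one 0 n)
        (by
          intro j hj
          have hm := PySem.List.mem_pyRange_one.mp hj
          refine ⟨hm.1, ?_⟩
          rw [List.length_map, PySem.List.length_pyRange_one]
          omega)
        (by
          intro j hj
          rcases Nat.lt_or_ge j.toNat ((PySem.List.pyRange 0 n 1).map (fun _ => "_")).length with h | h
          · rw [List.getD_eq_getElem?_getD, List.getElem?_eq_getElem h]
            simp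
          · rw [List.getD_eq_getElem?_getD, List.getElem?_eq_none (by omega)]
            rfl)]
  rw [PySem.List.pyRange_zero, List.foldl_map, List.map_map]
  simp only [Int.toNat_natCast]
  rw [pv_foldl_set_range (fun k => cell mvs i (k : Int)) n.toNat _ (by simp)]
  rw [List.drop_eq_nil_iff.mpr (by simp)]
  simp [Function.comp]

-- ---------- B side ----------

theorem rowfold_len (n : Int) (f : String) :
    ∀ (cols : List Int) (row : List String),
    (cols.foldl (fun row j => if 0 ≤ j ∧ j < n then PySem.List.pySetD row j f else row) row).length
      = row.length := by
  intro cols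
  induction cols with
  | nil => intro row; rfl
  | cons j cols ih =>
    intro row
    simp only [List.foldl_cons]
    rw [ih]
    split <;> simp [PySem.List.length_pySetD]

theorem rowfold_getD (n : Int) (f : String) :
    ∀ (cols : List Int) (row : List String) (q : Nat), q < n.toNat → row.length = n.toNat →
    (cols.foldl (fun row j => if 0 ≤ j ∧ j < n then PySem.List.pySetD row j f else row) row).getD q ""
      = if (q : Int) ∈ cols then f else row.getD q "" := by
  intro cols
  induction cols with
  | nil => intro row q _ _; simp
  | cons j cols ih =>
    intro row q hq hrow
    simp only [List.foldl_cons]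
    by_cases hc : 0 ≤ j ∧ j < n
    · rw [if_pos hc, PySem.List.pySetD_of_nonneg row _ hc.1]
      rw [ih (row.set j.toNat f) q hq (by rw [List.length_set]; exact hrow)]
      by_cases hqj : (q : Int) = j
      · have hjq : j.toNat = q := by omega
        rw [if_pos (show (q : Int) ∈ j :: cols by rw [hqj]; exact List.mem_cons_self)]
        by_cases hm : (q : Int) ∈ cols
        · rw [if_pos hm]
        · rw [if_neg hm, hjq, pv_getD_set_self _ _ _ _ (by omega)]
      · have hne : j.toNat ≠ q := by omega
        rw [pv_getD_set_ne _ _ _ _ _ hne]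
        by_cases hm : (q : Int) ∈ cols
        · rw [if_pos hm, if_pos (List.mem_cons_of_mem _ hm)]
        · rw [if_neg hm, if_neg (by simp [List.mem_cons, hqj, hm])]
    · rw [if_neg hc]
      rw [ih row q hq hrow]
      have hqj : (q : Int) ≠ j := by
        intro hEq
        exact hc ⟨by omega, by omega⟩
      by_cases hm : (q : Int) ∈ cols
      · rw [if_pos hm, if_pos (List.mem_cons_of_mem _ hm)]
      · rw [if_neg hm, if_neg (by simp [List.mem_cons, hqj, hm])]

theorem colsfold_eq (n : Int) (f : String) (i : Int) (hi : 0 ≤ i) :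
    ∀ (cols : List Int) (tab : List (List String)), i.toNat < tab.length →
    cols.foldl (fun tablero j =>
        if 0 ≤ j ∧ j < n then
          PySem.List.pySetD tablero i
            (PySem.List.pySetD (PySem.List.pyGetD tablero i []) j f)
        else tablero) tab
      = tab.set i.toNat
          (cols.foldl (fun row j => if 0 ≤ j ∧ j < n then PySem.List.pySetD row j f else row)
            (tab.getD i.toNat [])) := by
  intro cols
  induction cols with
  | nil =>
    intro tab h
    exact (pv_set_getD_self tab i.toNat [] h).symm
  | cons j cols ih =>
    intro tab h
    simp only [List.foldl_cons]
    by_cases hc : 0 ≤ j ∧ j < n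
    · rw [if_pos hc, if_pos hc]
      rw [PySem.List.pySetD_of_nonneg tab _ hi, pv_pyGetD_nonneg tab i [] hi]
      rw [ih _ (by rw [List.length_set]; exact h)]
      rw [pv_getD_set_self _ _ _ _ h, List.set_set]
    · rw [if_neg hc, if_neg hc]
      exact ih tab h

theorem itemsfold_shape (n : Int) (f : String) :
    ∀ (d : List (Int × List Int)) (tab : List (List String)),
    tab.length = n.toNat → (∀ row ∈ tab, row.length = n.toNat) →
    (d.foldl (fun tablero p =>
        if 0 ≤ p.1 ∧ p.1 < n then
          p.2.foldl (fun tablero j =>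
            if 0 ≤ j ∧ j < n then
              PySem.List.pySetD tablero p.1
                (PySem.List.pySetD (PySem.List.pyGetD tablero p.1 []) j f)
            else tablero) tablero
        else tablero) tab).length = n.toNat ∧
    ∀ row ∈ (d.foldl (fun tablero p =>
        if 0 ≤ p.1 ∧ p.1 < n then
          p.2.foldl (fun tablero j =>
            if 0 ≤ j ∧ j < n then
              PySem.List.pySetD tablero p.1
                (PySem.List.pySetD (PySem.List.pyGetD tablero p.1 []) j f)
            else tablero) tablero
        else tablero) tab), row.length = n.toNat := by
  intro d
  induction d with
  | nil => intro tab h1 h2; exact ⟨h1, h2⟩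
  | cons pr d ih =>
    intro tab h1 h2
    simp only [List.foldl_cons]
    by_cases hc : 0 ≤ pr.1 ∧ pr.1 < n
    · rw [if_pos hc, colsfold_eq n f pr.1 hc.1 pr.2 tab (by omega)]
      apply ih
      · rw [List.length_set]; exact h1
      · intro row hr
        rcases pv_mem_set hr with hEq | hmem
        · subst hEq
          rw [rowfold_len]
          have hlt : pr.1.toNat < tab.length := by omega
          rw [List.getD_eq_getElem?_getD, List.getElem?_eq_getElem hlt, Option.getD_some]
          exact h2 _ (List.getElem_mem hlt)
        · exact h2 _ hmem
    · rw [if_neg hc]; exact ih tab h1 h2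

theorem itemsfold_getD (n : Int) (f : String) :
    ∀ (d : List (Int × List Int)) (tab : List (List String)),
    (d.map Prod.fst).Nodup →
    tab.length = n.toNat → (∀ row ∈ tab, row.length = n.toNat) →
    ∀ (p q : Nat), p < n.toNat → q < n.toNat →
    ((d.foldl (fun tablero pr =>
        if 0 ≤ pr.1 ∧ pr.1 < n then
          pr.2.foldl (fun tablero j =>
            if 0 ≤ j ∧ j < n then
              PySem.List.pySetD tablero pr.1
                (PySem.List.pySetD (PySem.List.pyGetD tablero pr.1 []) j f)
            else tablero) tablero
        else tablero) tab).getD p []).getD q ""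
      = if hitP d (p : Int) (q : Int) then f else (tab.getD p []).getD q "" := by
  intro d
  induction d with
  | nil =>
    intro tab _ _ _ p q _ _
    simp [hitP, PySem.Dict.contains_mk]
  | cons pr d ih =>
    intro tab hnd h1 h2 p q hp hq
    have hndt : (d.map Prod.fst).Nodup := (List.nodup_cons.mp (by simpa using hnd)).2
    have hndh : pr.1 ∉ d.map Prod.fst := (List.nodup_cons.mp (by simpa using hnd)).1
    simp only [List.foldl_cons]
    rw [hitP_cons]
    by_cases hc : 0 ≤ pr.1 ∧ pr.1 < n
    · have hplen : pr.1.toNat < tab.length := by omega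
      rw [if_pos hc, colsfold_eq n f pr.1 hc.1 pr.2 tab hplen]
      have hshape :
          (∀ row ∈ tab.set pr.1.toNat
              (pr.2.foldl (fun row j => if 0 ≤ j ∧ j < n then PySem.List.pySetD row j f else row)
                (tab.getD pr.1.toNat [])), row.length = n.toNat) := by
        intro row hr
        rcases pv_mem_set hr with hEq | hmem
        · subst hEq
          rw [rowfold_len]
          rw [List.getD_eq_getElem?_getD, List.getElem?_eq_getElem hplen, Option.getD_some]
          exact h2 _ (List.getElem_mem hplen)
        · exact h2 _ hmem
      rw [ih _ hndt (by rw [List.length_set]; exact h1) hshape p q hp hq]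
      by_cases hkey : pr.1 = (p : Int)
      · have hbeq : (pr.1 == (p : Int)) = true := by simp [hkey]
        have hkeyn : pr.1.toNat = p := by omega
        rw [hitP_eq_false_of_not_key d (p : Int) (q : Int) (hkey ▸ hndh)]
        simp only [hbeq, if_true, Bool.false_eq_true, if_false]
        rw [hkeyn, pv_getD_set_self _ _ _ _ (by omega)]
        have hrowlen : (tab.getD p []).length = n.toNat := by
          rw [List.getD_eq_getElem?_getD, List.getElem?_eq_getElem (show p < tab.length by omega),
            Option.getD_some]
          exact h2 _ (List.getElem_mem (show p < tab.length by omega))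
        rw [rowfold_getD n f pr.2 (tab.getD p []) q hq hrowlen]
        by_cases hmem : (q : Int) ∈ pr.2 <;> simp [hmem]
      · have hbeq : (pr.1 == (p : Int)) = false := by simp [hkey]
        have hnep : pr.1.toNat ≠ p := by omega
        rw [pv_getD_set_ne _ _ _ _ _ hnep]
        simp only [hbeq, Bool.false_eq_true, if_false]
    · rw [if_neg hc]
      rw [ih tab hndt h1 h2 p q hp hq]
      have hbeq : (pr.1 == (p : Int)) = false := by
        have : pr.1 ≠ (p : Int) := by
          intro hEq; exact hc ⟨by omega, by omega⟩
        simp [this]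
      simp only [hbeq, Bool.false_eq_true, if_false]

theorem playersfold_getD (n : Int) :
    ∀ (ps : List (Int × List (Int × List Int))) (tab : List (List String)),
    (∀ pr ∈ ps, (pr.2.map Prod.fst).Nodup) →
    tab.length = n.toNat → (∀ row ∈ tab, row.length = n.toNat) →
    ∀ (p q : Nat), p < n.toNat → q < n.toNat →
    ((ps.foldl (fun tablero km =>
        km.2.foldl (fun tablero pr =>
          if 0 ≤ pr.1 ∧ pr.1 < n then
            pr.2.foldl (fun tablero j =>
              if 0 ≤ j ∧ j < n then
                PySem.List.pySetD tablero pr.1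
                  (PySem.List.pySetD (PySem.List.pyGetD tablero pr.1 [])
                    j (PySem.List.pyGetD fichas km.1 ""))
              else tablero) tablero
          else tablero) tablero) tab).getD p []).getD q ""
      = cellP ps (p : Int) (q : Int) ((tab.getD p []).getD q "") := by
  intro ps
  induction ps with
  | nil => intro tab _ _ _ p q _ _; rfl
  | cons km ps ih =>
    intro tab hnd h1 h2 p q hp hq
    simp only [List.foldl_cons]
    have hsh := itemsfold_shape n (PySem.List.pyGetD fichas km.1 "") km.2 tab h1 h2
    rw [ih _ (fun pr hpr => hnd pr (List.mem_cons_of_mem _ hpr)) hsh.1 hsh.2 p q hp hq]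
    rw [itemsfold_getD n (PySem.List.pyGetD fichas km.1 "") km.2 tab
          (hnd km List.mem_cons_self) h1 h2 p q hp hq]
    rw [cellP_cons]

theorem playersfold_shape (n : Int) :
    ∀ (ps : List (Int × List (Int × List Int))) (tab : List (List String)),
    tab.length = n.toNat → (∀ row ∈ tab, row.length = n.toNat) →
    (ps.foldl (fun tablero km =>
        km.2.foldl (fun tablero pr =>
          if 0 ≤ pr.1 ∧ pr.1 < n then
            pr.2.foldl (fun tablero j =>
              if 0 ≤ j ∧ j < n then
                PySem.List.pySetD tablero pr.1
                  (PySem.List.pySetD (PySem.List.pyGetD tablero pr.1 [])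
                    j (PySem.List.pyGetD fichas km.1 ""))
              else tablero) tablero
          else tablero) tablero) tab).length = n.toNat ∧
    ∀ row ∈ (ps.foldl (fun tablero km =>
        km.2.foldl (fun tablero pr =>
          if 0 ≤ pr.1 ∧ pr.1 < n then
            pr.2.foldl (fun tablero j =>
              if 0 ≤ j ∧ j < n then
                PySem.List.pySetD tablero pr.1
                  (PySem.List.pySetD (PySem.List.pyGetD tablero pr.1 [])
                    j (PySem.List.pyGetD fichas km.1 ""))
              else tablero) tablero
          else tablero) tablero) tab), row.length = n.toNat := by
  intro ps
  induction ps with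
  | nil => intro tab h1 h2; exact ⟨h1, h2⟩
  | cons km ps ih =>
    intro tab h1 h2
    simp only [List.foldl_cons]
    have hsh := itemsfold_shape n (PySem.List.pyGetD fichas km.1 "") km.2 tab h1 h2
    exact ih _ hsh.1 hsh.2

theorem B_eq_grid (n : Int) (mvs : List (List (Int × List Int)))
    (hnd : ∀ d ∈ mvs, (d.map Prod.fst).Nodup) :
    generar_tablero_alt n mvs = grid n mvs := by
  simp only [generar_tablero_alt, grid]
  have ht0len : ((PySem.List.pyRange 0 n 1).map
      (fun _ => PySem.List.pyRepeat ["_"] n)).length = n.toNat := by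
    rw [List.length_map, PySem.List.length_pyRange_one]; omega
  have ht0rows : ∀ row ∈ (PySem.List.pyRange 0 n 1).map
      (fun _ => PySem.List.pyRepeat ["_"] n), row.length = n.toNat := by
    intro row hr
    rcases List.mem_map.mp hr with ⟨_, _, hEq⟩
    rw [← hEq, PySem.List.pyRepeat_singleton, List.length_replicate]
  have hndE : ∀ pr ∈ PySem.List.enumerate mvs, (pr.2.map Prod.fst).Nodup := by
    intro pr hpr
    apply hnd
    have : pr.2 ∈ (PySem.List.enumerate mvs).map (·.2) := List.mem_map_of_mem hpr
    rwa [PySem.List.map_snd_enumerate] at this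
  have hsh := playersfold_shape n (PySem.List.enumerate mvs) _ ht0len ht0rows
  apply List.ext_getElem
  · rw [hsh.1, List.length_map, PySem.List.length_pyRange_one]; omega
  · intro p h1 h2
    have hp : p < n.toNat := by rw [hsh.1] at h1; exact h1
    apply List.ext_getElem
    · have := hsh.2 _ (List.getElem_mem h1)
      rw [this, List.getElem_map, List.length_map, PySem.List.length_pyRange_one]
      omega
    · intro q hq1 hq2
      have hq : q < n.toNat := by
        have := hsh.2 _ (List.getElem_mem h1)
        omega
      rw [← pv_getD_getD_eq_getElem (d := ([] : List String)) (d' := "") (h1 := h1) (hq := hq1)]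
      rw [playersfold_getD n (PySem.List.enumerate mvs) _ hndE ht0len ht0rows p q hp hq]
      have hb1 : p < ((PySem.List.pyRange 0 n 1).map
          (fun _ => PySem.List.pyRepeat ["_"] n)).length := by rw [ht0len]; omega
      have hb2 : q < (((PySem.List.pyRange 0 n 1).map
          (fun _ => PySem.List.pyRepeat ["_"] n))[p]'hb1).length := by
        rw [List.getElem_map, PySem.List.pyRepeat_singleton, List.length_replicate]; omega
      rw [pv_getD_getD_eq_getElem _ p q [] "" hb1 hb2]
      simp only [List.getElem_map, PySem.List.pyRepeat_singleton, List.getElem_replicate,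
        PySem.List.getElem_pyRange_one, zero_add]
      rfl

-- ===== VERDICT (by name: the statement is the Claim_ definition above) =====
theorem generar_tablero_spec : Claim_equal_generar_tablero := by
  intro n mvs _hdom hpre
  unfold Spec_generar_tablero
  rw [A_eq_grid, B_eq_grid n mvs hpre.1]
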